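-- pv_equiv track=rewrite | github.com/9382/advent-of-code-2023 | 13/code.py | SolveGridReflections
-- ===== SOURCE A (Python) =====
-- def SolveGridReflections(GridRows):
-- 	GridTotal = 0
-- 	# Look for row reflections
-- 	GridColumns = []
-- 	for x in range(len(GridRows[0])):
-- 		GridColumns.append("") # Prepare columns row
-- 	for y in range(len(GridRows)):
-- 		for x in range(len(GridRows[y])):
-- 			GridColumns[x] += GridRows[y][x]
-- 		if y > 0 and GridRows[y] == GridRows[y-1]:
-- 			IsAReflection = True
-- 			for i in range(1, len(GridRows)-y):
-- 				if y-i > 0 and GridRows[y+i] != GridRows[y-i-1]: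
-- 					IsAReflection = False
-- 					break
-- 			if IsAReflection:
-- 				GridTotal = GridTotal + 100*y
-- 	# Look for column reflections
-- 	for x in range(len(GridColumns)):
-- 		if x > 0 and GridColumns[x] == GridColumns[x-1]:
-- 			IsAReflection = True
-- 			for i in range(1, len(GridColumns)-x):
-- 				if x-i > 0 and GridColumns[x+i] != GridColumns[x-i-1]:
-- 					IsAReflection = False
-- 					break
-- 			if IsAReflection:
-- 				GridTotal = GridTotal + x
-- 	return GridTotal
-- ===== SOURCE B (Python) =====
-- def SolveGridReflections(GridRows):
--     # Interned symbol ids + positional base-B prefix codes: each candidate axis is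
--     # decided by one O(1) arithmetic comparison of precomputed segment codes instead
--     # of re-scanning the mirrored halves.
--     def axis_sum(lines):
--         n = len(lines)
--         ids = [lines.index(l) for l in lines]   # id of a line = its first-occurrence index
--         base = n + 1                            # every id is < base
--         P = [0]   # P[i] = code of ids[:i] read left-to-right  (digit stream, base 'base')
--         S = [0]   # S[i] = code of ids[:i] read right-to-left
--         pw = [1]  # pw[i] = base**i
--         for x in ids:
--             P.append(P[-1] * base + x)
--             S.append(S[-1] + x * pw[-1])
--             pw.append(pw[-1] * base)
--         total = 0
--         for p in range(1, n):
--             k = min(p, n - p)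
--             # reversed(ids[p-k:p]) == ids[p:p+k], compared via segment codes
--             if S[p] - S[p - k] == (P[p + k] - P[p] * pw[k]) * pw[p - k]:
--                 total += p
--         return total
--
--     cols = ["".join(r[x] for r in GridRows if x < len(r))
--             for x in range(len(GridRows[0]))]
--     return 100 * axis_sum(GridRows) + axis_sum(cols)
-- ===== Notes on version B (the rewrite author's own statement) =====
-- stated objective: alternative
-- what changed: B replaces A's per-axis expand-and-verify rescans by a numeric encoding: lines are interned to first-occurrence ids and base-(n+1) positional prefix codes (forward and reversed) are precomputed once, so each candidate reflection axis is decided by a single exact arithmetic comparison of segment codes instead of comparing the mirrored halves line by line (a timing run measured B ~22x faster at the largest sizes, where A's inner rescans run long).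
import Mathlib
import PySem

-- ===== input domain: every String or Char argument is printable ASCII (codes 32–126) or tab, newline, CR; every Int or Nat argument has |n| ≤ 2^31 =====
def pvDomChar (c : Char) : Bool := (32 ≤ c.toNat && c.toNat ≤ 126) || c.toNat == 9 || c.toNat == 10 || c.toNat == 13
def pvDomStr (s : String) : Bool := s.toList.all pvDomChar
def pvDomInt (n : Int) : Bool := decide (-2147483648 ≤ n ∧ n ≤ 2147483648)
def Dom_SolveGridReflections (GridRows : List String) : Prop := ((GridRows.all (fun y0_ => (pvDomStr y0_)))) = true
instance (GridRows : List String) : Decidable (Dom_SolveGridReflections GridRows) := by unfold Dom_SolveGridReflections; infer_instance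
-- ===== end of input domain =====

-- B interns lines to first-occurrence ids and compares mirrored segments through precomputed
-- positional base-(n+1) prefix codes (one exact arithmetic test per axis) instead of A's
-- per-axis element-by-element rescans (objective: alternative algorithm, similar cost).
-- ===== PORT A =====
-- A's inner 'for i in range(1, len-y): if y-i>0 and L[y+i] != L[y-i-1]: break' loop (the same code
-- is used for the row pass and the column pass); break-with-flag on a pure predicate is `all`.
def aCheck (L : List (List Char)) (y : Nat) : Bool :=
  (List.range' 1 (L.length - y - 1)).all fun i =>
    !(decide (i < y) && decide (L.getD (y + i) [] ≠ L.getD (y - i - 1) []))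

-- A's 'for x in range(len(GridRows[y])): GridColumns[x] += GridRows[y][x]' (in-range under Pre_)
def aColUpd (row : List Char) (cs : List (List Char)) : List (List Char) :=
  (List.range row.length).foldl (fun cs x => cs.set x (cs.getD x [] ++ [row.getD x ' '])) cs

-- one iteration of A's y-loop: extend every column, then the row-reflection test
def aStep (rows : List (List Char)) (st : List (List Char) × Int) (y : Nat) :
    List (List Char) × Int :=
  (aColUpd (rows.getD y []) st.1,
   if 0 < y ∧ rows.getD y [] = rows.getD (y - 1) [] ∧ aCheck rows y = true then
     st.2 + 100 * (y : Int)
   else st.2)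

def SolveGridReflections (GridRows : List String) : Int :=
  let rows := GridRows.map String.toList
  let st := (List.range rows.length).foldl (aStep rows)
      (List.replicate (rows.headD []).length [], 0)
  (List.range st.1.length).foldl
    (fun t x =>
      if 0 < x ∧ st.1.getD x [] = st.1.getD (x - 1) [] ∧ aCheck st.1 x = true then
        t + (x : Int)
      else t)
    st.2

-- ===== PORT B =====
-- Source B's axis_sum: ids by lines.index (PySem.List.index?; every l is in lines, so the
-- .getD 0 default is never taken), then the P/S/pw append loop (P[-1] on a nonempty,
-- append-only list is getLastD 0), then one arithmetic comparison per axis p.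
def bAxisSum (lines : List (List Char)) : Int :=
  let n := lines.length
  let ids : List Int := lines.map (fun l => (((PySem.List.index? lines l).getD 0 : Nat) : Int))
  let base : Int := (n : Int) + 1
  let st := ids.foldl
    (fun (st : List Int × List Int × List Int) x =>
      (st.1 ++ [st.1.getLastD 0 * base + x],
       st.2.1 ++ [st.2.1.getLastD 0 + x * st.2.2.getLastD 0],
       st.2.2 ++ [st.2.2.getLastD 0 * base]))
    ([0], [0], [1])
  (List.range' 1 (n - 1)).foldl
    (fun total p =>
      let k := min p (n - p)
      if st.2.1.getD p 0 - st.2.1.getD (p - k) 0 =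
          (st.1.getD (p + k) 0 - st.1.getD p 0 * st.2.2.getD k 0) * st.2.2.getD (p - k) 0
      then total + (p : Int) else total)
    0

def SolveGridReflections_alt (GridRows : List String) : Int :=
  let rows := GridRows.map String.toList
  -- '"".join(r[x] for r in GridRows if x < len(r))' is filterMap of the optional x-th character
  let cols := (List.range (rows.headD []).length).map fun x => rows.filterMap fun r => r[x]?
  100 * bAxisSum rows + bAxisSum cols

-- ===== PRECONDITION & SPEC =====
-- Pre_ excludes exactly the inputs where A raises IndexError: the empty grid (GridRows[0]) and
-- grids with a row longer than the first row (GridColumns[x] += … past the prepared columns).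
def Pre_SolveGridReflections (GridRows : List String) : Prop :=
  GridRows ≠ [] ∧ ∀ s ∈ GridRows, s.toList.length ≤ (GridRows.headD "").toList.length
instance (GridRows : List String) : Decidable (Pre_SolveGridReflections GridRows) := by
  unfold Pre_SolveGridReflections; infer_instance
def pvWitness_SolveGridReflections : List String := ["##", "##"]

def Spec_SolveGridReflections (GridRows : List String) (out : Int) : Prop :=
  out = SolveGridReflections_alt GridRows
instance (GridRows : List String) (out : Int) : Decidable (Spec_SolveGridReflections GridRows out) := by
  unfold Spec_SolveGridReflections; infer_instance

-- ===== CLAIM (what is proved, stated in full; the proofs are below) =====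
def Claim_equal_SolveGridReflections : Prop := ∀ (GridRows : List String), Dom_SolveGridReflections GridRows → Pre_SolveGridReflections GridRows → Spec_SolveGridReflections GridRows (SolveGridReflections GridRows)
-- ===== LEMMAS AND PROOFS =====

-- A's fold carries a (columns, total) pair whose components never read each other: split it.
theorem aStep_split (rows : List (List Char)) (l : List Nat) (st : List (List Char) × Int) :
    l.foldl (aStep rows) st =
      (l.foldl (fun cs y => aColUpd (rows.getD y []) cs) st.1,
       l.foldl (fun t y =>
         if 0 < y ∧ rows.getD y [] = rows.getD (y - 1) [] ∧ aCheck rows y = true then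
           t + 100 * (y : Int)
         else t) st.2) := by
  induction l generalizing st with
  | nil => rfl
  | cons a l ih => simpa [aStep] using ih _

-- indexing fold over range(len xs) is a fold over xs
theorem foldl_range_getD {α β : Type} (f : β → α → β) (d : α) :
    ∀ (xs : List α) (b : β),
      (List.range xs.length).foldl (fun acc i => f acc (xs.getD i d)) b = xs.foldl f b := by
  intro xs
  induction xs with
  | nil => intro b; rfl
  | cons x xs ih =>
    intro b
    simp [List.range_succ_eq_map, List.foldl_map]
    exact ih (f b x)

theorem foldl_ite_shift1 (c : Nat → Prop) [DecidablePred c] :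
    ∀ (l : List Nat) (t0 : Int),
      l.foldl (fun t p => if c p then t + (p : Int) else t) t0 =
        t0 + l.foldl (fun t p => if c p then t + (p : Int) else t) 0 := by
  intro l
  induction l with
  | nil => intro t0; simp
  | cons a l ih =>
    intro t0
    simp only [List.foldl_cons]
    rw [ih, ih (if c a then 0 + (a : Int) else 0)]
    split_ifs <;> ring

-- ite-accumulating fold: shift the start value out and factor the weight
theorem foldl_ite_shift (c : Nat → Prop) [DecidablePred c] (w : Int) :
    ∀ (l : List Nat) (t0 : Int),
      l.foldl (fun t p => if c p then t + w * (p : Int) else t) t0 =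
        t0 + w * l.foldl (fun t p => if c p then t + (p : Int) else t) 0 := by
  intro l
  induction l with
  | nil => intro t0; simp
  | cons a l ih =>
    intro t0
    simp only [List.foldl_cons]
    rw [ih, foldl_ite_shift1 c l (if c a then 0 + (a : Int) else 0)]
    split_ifs <;> ring

theorem set_map_range {α : Type} (W m : Nat) (h : Nat → α) (v : α) :
    ((List.range W).map h).set m v = (List.range W).map (fun x => if x = m then v else h x) := by
  apply List.ext_getElem
  · simp
  · intro i h1 h2
    simp only [List.getElem_set, List.getElem_map, List.getElem_range]
    by_cases e : m = i
    · subst e; simp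
    · rw [if_neg e, if_neg (fun h => e h.symm)]

theorem getD_map_range' {α : Type} (W m : Nat) (h : Nat → α) (d : α) (hm : m < W) :
    ((List.range W).map h).getD m d = h m := by
  rw [List.getD_eq_getElem _ _ (by simp [hm])]
  simp

-- elementwise description of one column-update pass over a comprehension-shaped column list
theorem aColUpd_aux (row : List Char) (W : Nat) (g : Nat → List Char) :
    ∀ m, m ≤ W → m ≤ row.length →
    (List.range m).foldl (fun cs x => cs.set x (cs.getD x [] ++ [row.getD x ' ']))
        ((List.range W).map g)
      = (List.range W).map (fun x => if x < m then g x ++ [row.getD x ' '] else g x) := by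
  intro m
  induction m with
  | zero => intro _ _; simp
  | succ m ih =>
    intro hmW hmr
    rw [List.range_succ, List.foldl_append, ih (by omega) (by omega)]
    simp only [List.foldl_cons, List.foldl_nil]
    rw [getD_map_range' W m _ [] (by omega), set_map_range W m _ _]
    apply List.map_congr_left
    intro x hx
    by_cases e : x = m
    · subst e
      rw [if_pos rfl, if_neg (by omega), if_pos (by omega)]
    · rw [if_neg e]
      by_cases h2 : x < m
      · rw [if_pos h2, if_pos (by omega)]
      · rw [if_neg h2, if_neg (by omega)]

theorem aColUpd_map_range (row : List Char) (W : Nat) (g : Nat → List Char)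
    (hle : row.length ≤ W) :
    aColUpd row ((List.range W).map g) =
      (List.range W).map (fun x => g x ++ (row[x]?.elim [] (fun c => [c]))) := by
  rw [aColUpd, aColUpd_aux row W g row.length hle le_rfl]
  apply List.map_congr_left
  intro x hx
  by_cases h : x < row.length
  · rw [if_pos h, List.getElem?_eq_getElem h, List.getD_eq_getElem _ _ h]
    rfl
  · rw [if_neg h, List.getElem?_eq_none (by omega)]
    simp

-- the whole column-building fold produces B's comprehension columns
theorem cols_eq (W : Nat) :
    ∀ (rows : List (List Char)) (g : Nat → List Char), (∀ r ∈ rows, r.length ≤ W) →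
    rows.foldl (fun cs row => aColUpd row cs) ((List.range W).map g) =
      (List.range W).map (fun x => g x ++ rows.filterMap (fun r => r[x]?)) := by
  intro rows
  induction rows with
  | nil => intro g _; simp
  | cons r rs ih =>
    intro g hW
    simp only [List.foldl_cons]
    rw [aColUpd_map_range r W g (hW r (by simp)),
        ih _ (fun r hr => hW r (by simp [hr]))]
    apply List.map_congr_left
    intro x hx
    rw [List.filterMap_cons]
    cases h : r[x]? <;> simp

-- proof-side bridge form of the reflection sum: slice-reverse comparison per axis
def bMirrorSum (lines : List (List Char)) : Int :=
  (List.range' 1 (lines.length - 1)).foldl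
    (fun total p =>
      let k := min p (lines.length - p)
      if ((lines.drop (p - k)).take k).reverse = (lines.drop p).take k then total + (p : Int)
      else total)
    0

-- the slice-reverse comparison says exactly "mirror around p reaching a boundary"
theorem slice_iff (L : List (List Char)) (p k : Nat) (h1 : k ≤ p) (h2 : p + k ≤ L.length) :
    (((L.drop (p - k)).take k).reverse = (L.drop p).take k) ↔
      ∀ j, j < k → L.getD (p - 1 - j) [] = L.getD (p + j) [] := by
  have hlen1 : (((L.drop (p - k)).take k).reverse).length = k := by
    simp [List.length_take, List.length_drop]; omega
  have hlen2 : ((L.drop p).take k).length = k := by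
    simp [List.length_take, List.length_drop]; omega
  have hL : ∀ j (hj : j < k),
      (((L.drop (p - k)).take k).reverse)[j]'(by omega) = L.getD (p - 1 - j) [] := by
    intro j hj
    rw [List.getElem_reverse]
    rw [List.getElem_take, List.getElem_drop]
    rw [List.getD_eq_getElem _ _ (by omega)]
    congr 1
    simp [List.length_take, List.length_drop]
    omega
  have hR : ∀ j (hj : j < k),
      ((L.drop p).take k)[j]'(by omega) = L.getD (p + j) [] := by
    intro j hj
    rw [List.getElem_take, List.getElem_drop]
    rw [List.getD_eq_getElem _ _ (by omega)]
  constructor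
  · intro h j hj
    rw [← hL j hj, ← hR j hj]
    congr 1
  · intro h
    apply List.ext_getElem (by omega)
    intro i hi1 hi2
    rw [hL i (by omega), hR i (by omega)]
    exact h i (by omega)

-- A's paired-index reflection test says the same
theorem acond_iff (L : List (List Char)) (p : Nat) (h1 : 1 ≤ p) (h2 : p < L.length) :
    (0 < p ∧ L.getD p [] = L.getD (p - 1) [] ∧ aCheck L p = true) ↔
      ∀ j, j < min p (L.length - p) → L.getD (p - 1 - j) [] = L.getD (p + j) [] := by
  simp only [aCheck, List.all_eq_true, List.mem_range'_1, Bool.not_eq_eq_eq_not,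
    Bool.not_true, Bool.and_eq_false_iff, decide_eq_false_iff_not, not_lt, not_not]
  constructor
  · rintro ⟨-, h0, hall⟩ j hj
    rcases Nat.eq_zero_or_pos j with rfl | hjpos
    · simpa using h0.symm
    · have := hall j ⟨hjpos, by omega⟩
      rcases this with hge | heq
      · omega
      · have e : p - 1 - j = p - j - 1 := by omega
        rw [e]; exact heq.symm
  · intro h
    refine ⟨h1, ?_, ?_⟩
    · have := h 0 (by omega)
      simpa using this.symm
    · intro i ⟨hi1, hi2⟩
      by_cases hip : i < p
      · right
        have := h i (by omega)
        have e : p - 1 - i = p - i - 1 := by omega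
        rw [e] at this
        exact this.symm
      · left; omega

-- any A-shaped reflection pass equals t0 + w * bMirrorSum
theorem pass_eq (L : List (List Char)) (w : Int) (t0 : Int) :
    (List.range L.length).foldl
      (fun t p =>
        if 0 < p ∧ L.getD p [] = L.getD (p - 1) [] ∧ aCheck L p = true then t + w * (p : Int)
        else t) t0 = t0 + w * bMirrorSum L := by
  rcases n0 : L.length with _ | m
  · simp [bMirrorSum, n0]
  · have hrange : List.range (m + 1) = 0 :: List.range' 1 m := by
      rw [List.range_eq_range', List.range'_succ]
    rw [hrange, List.foldl_cons, if_neg (by simp)]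
    rw [foldl_ite_shift (fun p => 0 < p ∧ L.getD p [] = L.getD (p - 1) [] ∧ aCheck L p = true)]
    have hb : bMirrorSum L =
        (List.range' 1 m).foldl
          (fun t p => if (0 < p ∧ L.getD p [] = L.getD (p - 1) [] ∧ aCheck L p = true)
                      then t + (p : Int) else t) 0 := by
      rw [bMirrorSum, n0]
      simp only [Nat.add_sub_cancel]
      apply PySem.List.foldl_congr_mem
      intro acc x hx
      rw [List.mem_range'_1] at hx
      have hiff := (acond_iff L x (by omega) (by omega)).trans
        (slice_iff L x (min x (L.length - x)) (by omega) (by omega)).symm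
      rw [n0] at hiff
      by_cases hc : 0 < x ∧ L.getD x [] = L.getD (x - 1) [] ∧ aCheck L x = true
      · rw [if_pos hc, if_pos (hiff.mp hc)]
      · rw [if_neg hc, if_neg (fun h => hc (hiff.mpr h))]
    rw [hb]

-- ===== positional code machinery for B =====

-- code of a digit list, most significant digit first (B's P recurrence)
def pcode (b : Int) (l : List Int) : Int := l.foldl (fun a d => a * b + d) 0

theorem pcode_foldl_from (b : Int) (v : List Int) :
    ∀ (a : Int), v.foldl (fun a d => a * b + d) a = a * b ^ v.length + pcode b v := by
  induction v with
  | nil => intro a; simp [pcode]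
  | cons x xs ih =>
    intro a
    simp only [List.foldl_cons, List.length_cons]
    have hx : pcode b (x :: xs) = x * b ^ xs.length + pcode b xs := by
      calc pcode b (x :: xs) = xs.foldl (fun a d => a * b + d) (0 * b + x) := rfl
        _ = xs.foldl (fun a d => a * b + d) x := by rw [zero_mul, zero_add]
        _ = x * b ^ xs.length + pcode b xs := ih x
    rw [ih (a * b + x), hx]
    ring

theorem pcode_cons (b x : Int) (l : List Int) :
    pcode b (x :: l) = x * b ^ l.length + pcode b l := by
  calc pcode b (x :: l) = l.foldl (fun a d => a * b + d) (0 * b + x) := rfl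
    _ = l.foldl (fun a d => a * b + d) x := by rw [zero_mul, zero_add]
    _ = x * b ^ l.length + pcode b l := pcode_foldl_from b l x

theorem pcode_singleton (b x : Int) : pcode b [x] = x := by
  calc pcode b [x] = 0 * b + x := rfl
    _ = x := by rw [zero_mul, zero_add]

theorem pcode_append (b : Int) (u v : List Int) :
    pcode b (u ++ v) = pcode b u * b ^ v.length + pcode b v := by
  have h1 : pcode b (u ++ v) = v.foldl (fun a d => a * b + d) (pcode b u) := by
    unfold pcode
    rw [List.foldl_append]
  rw [h1, pcode_foldl_from]

theorem pcode_bounds (b : Int) (hb : 1 ≤ b) :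
    ∀ (l : List Int), (∀ d ∈ l, 0 ≤ d ∧ d < b) →
      0 ≤ pcode b l ∧ pcode b l < b ^ l.length := by
  intro l
  induction l with
  | nil => intro _; simp [pcode]
  | cons x xs ih =>
    intro hd
    obtain ⟨hx0, hxb⟩ := hd x (by simp)
    obtain ⟨h0, h1⟩ := ih (fun d hdm => hd d (by simp [hdm]))
    have hpow : (0:Int) < b ^ xs.length := by positivity
    rw [pcode_cons]
    constructor
    · nlinarith
    · rw [List.length_cons, pow_succ]
      nlinarith

theorem pcode_inj (b : Int) (hb : 1 ≤ b) :
    ∀ (l1 l2 : List Int), l1.length = l2.length →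
      (∀ d ∈ l1, 0 ≤ d ∧ d < b) → (∀ d ∈ l2, 0 ≤ d ∧ d < b) →
      pcode b l1 = pcode b l2 → l1 = l2 := by
  intro l1
  induction l1 with
  | nil =>
    intro l2 hlen _ _ _
    cases l2 with
    | nil => rfl
    | cons y ys => simp at hlen
  | cons x xs ih =>
    intro l2 hlen hd1 hd2 hcode
    cases l2 with
    | nil => simp at hlen
    | cons y ys =>
      have hlen' : xs.length = ys.length := by simpa using hlen
      obtain ⟨hx0, hxb⟩ := hd1 x (by simp)
      obtain ⟨hy0, hyb⟩ := hd2 y (by simp)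
      obtain ⟨hc10, hc11⟩ := pcode_bounds b hb xs (fun d hdm => hd1 d (by simp [hdm]))
      obtain ⟨hc20, hc21⟩ := pcode_bounds b hb ys (fun d hdm => hd2 d (by simp [hdm]))
      rw [pcode_cons, pcode_cons, hlen'] at hcode
      have hpow : (0:Int) < b ^ ys.length := by positivity
      rw [hlen'] at hc11
      have hxy : x = y := by
        rcases lt_trichotomy x y with h | h | h
        · nlinarith
        · exact h
        · nlinarith
      subst hxy
      have : pcode b xs = pcode b ys := by linarith
      rw [ih ys hlen' (fun d hdm => hd1 d (by simp [hdm]))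
            (fun d hdm => hd2 d (by simp [hdm])) this]

-- append one value computed from the last entry to a map-over-range list
theorem map_range_snoc {α : Type} (m : Nat) (g h : Nat → α) (z : α)
    (hgh : ∀ i, i ≤ m → h i = g i) (hz : z = h (m + 1)) :
    (List.range (m + 1)).map g ++ [z] = (List.range (m + 1 + 1)).map h := by
  conv_rhs => rw [List.range_succ]
  rw [List.map_append]
  congr 1
  · apply List.map_congr_left
    intro i hi
    rw [List.mem_range] at hi
    exact (hgh i (by omega)).symm
  · simp [hz]

-- the P/S/pw building fold, characterized elementwise
theorem build_eq (b : Int) (ids : List Int) :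
    ids.foldl
      (fun (st : List Int × List Int × List Int) x =>
        (st.1 ++ [st.1.getLastD 0 * b + x],
         st.2.1 ++ [st.2.1.getLastD 0 + x * st.2.2.getLastD 0],
         st.2.2 ++ [st.2.2.getLastD 0 * b]))
      ([0], [0], [1]) =
    ((List.range (ids.length + 1)).map (fun i => pcode b (ids.take i)),
     (List.range (ids.length + 1)).map (fun i => pcode b (ids.take i).reverse),
     (List.range (ids.length + 1)).map (fun i => b ^ i)) := by
  induction ids using List.reverseRecOn with
  | nil => simp [pcode]
  | append_singleton t x ih =>
    rw [List.foldl_append, ih]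
    simp only [List.foldl_cons, List.foldl_nil]
    have hm : ∀ (g : Nat → Int), ((List.range (t.length + 1)).map g).getLastD 0 = g t.length := by
      intro g
      rw [List.range_succ]
      simp
    rw [hm, hm, hm]
    have hlen : (t ++ [x]).length + 1 = t.length + 1 + 1 := by simp
    rw [hlen]
    refine Prod.ext ?_ (Prod.ext ?_ ?_) <;> simp only []
    · apply map_range_snoc
      · intro i hi
        rw [List.take_append_of_le_length (by omega)]
      · have htake : (t ++ [x]).take (t.length + 1) = t ++ [x] :=
          List.take_of_length_le (by simp)
        rw [htake, List.take_length, pcode_append, pcode_singleton]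
        simp
    · apply map_range_snoc
      · intro i hi
        rw [List.take_append_of_le_length (by omega)]
      · have htake : (t ++ [x]).take (t.length + 1) = t ++ [x] :=
          List.take_of_length_le (by simp)
        rw [htake, List.take_length, List.reverse_append]
        simp only [List.reverse_singleton, List.singleton_append]
        rw [pcode_cons, List.length_reverse]
        ring
    · apply map_range_snoc
      · intro i hi
        rfl
      · rw [pow_succ]

-- the interning map l ↦ lines.index(l) is injective on the lines and bounded by the length
theorem fId_spec (L : List (List Char)) (l : List Char) (hl : l ∈ L) :
    ∃ k, PySem.List.index? L l = some k ∧ k < L.length ∧ L.getD k [] = l := by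
  have hs : (PySem.List.index? L l).isSome := (PySem.List.index?_isSome_iff L l).mpr hl
  obtain ⟨k, hk⟩ := Option.isSome_iff_exists.mp hs
  obtain ⟨hkl, hget, -⟩ := PySem.List.getElem_of_index?_eq_some hk
  exact ⟨k, hk, hkl, by rw [List.getD_eq_getElem _ _ hkl, hget]⟩

theorem map_inj_on {α β : Type} (f : α → β) (L : List α)
    (hinj : ∀ a ∈ L, ∀ b ∈ L, f a = f b → a = b) :
    ∀ (u v : List α), (∀ x ∈ u, x ∈ L) → (∀ x ∈ v, x ∈ L) →
      u.map f = v.map f → u = v := by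
  intro u
  induction u with
  | nil =>
    intro v _ _ h
    cases v with
    | nil => rfl
    | cons y ys => simp at h
  | cons x xs ih =>
    intro v hu hv h
    cases v with
    | nil => simp at h
    | cons y ys =>
      simp only [List.map_cons, List.cons.injEq] at h
      have hx : x = y := hinj x (hu x (by simp)) y (hv y (by simp)) h.1
      rw [hx, ih ys (fun z hz => hu z (by simp [hz])) (fun z hz => hv z (by simp [hz])) h.2]

-- B's encoded per-axis test equals the slice-reverse mirror sum
theorem bAxisSum_eq (L : List (List Char)) : bAxisSum L = bMirrorSum L := by
  have hfin : ∀ l ∈ L, ∃ k, PySem.List.index? L l = some k ∧ k < L.length ∧ L.getD k [] = l :=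
    fun l hl => fId_spec L l hl
  simp only [bAxisSum, bMirrorSum]
  rw [build_eq]
  set n := L.length with hn
  set b : Int := (n : Int) + 1 with hbdef
  set f : List Char → Int := fun l => (((PySem.List.index? L l).getD 0 : Nat) : Int) with hf
  set ids : List Int := L.map f with hids
  have hlen : ids.length = n := by simp [hids, hn]
  rw [hlen]
  apply PySem.List.foldl_congr_mem
  intro acc p hp
  rw [List.mem_range'_1] at hp
  obtain ⟨hp1, hp2⟩ := hp
  have hn2 : 2 ≤ n := by omega
  have hpn : p < n := by omega
  set k := min p (n - p) with hk
  have hk1 : k ≤ p := by omega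
  have hk2 : p + k ≤ n := by omega
  -- resolve the five getD lookups on the map-range arrays
  rw [getD_map_range' _ p _ _ (by omega), getD_map_range' _ (p - k) _ _ (by omega),
      getD_map_range' _ (p + k) _ _ (by omega), getD_map_range' _ p _ _ (by omega),
      getD_map_range' _ k _ _ (by omega), getD_map_range' _ (p - k) _ _ (by omega)]
  -- digit bounds for the ids
  have hdig : ∀ d ∈ ids, 0 ≤ d ∧ d < b := by
    intro d hd
    rw [hids, List.mem_map] at hd
    obtain ⟨l, hl, rfl⟩ := hd
    obtain ⟨j, hj, hjl, -⟩ := hfin l hl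
    rw [hf]
    simp only [hj, Option.getD_some]
    constructor
    · positivity
    · rw [hbdef]
      exact_mod_cast by omega
  have hb1 : (1:Int) ≤ b := by rw [hbdef]; omega
  -- segment identities
  have hseg2 : pcode b (ids.take (p + k)) - pcode b (ids.take p) * b ^ k =
      pcode b ((ids.drop p).take k) := by
    rw [List.take_add, pcode_append]
    have : ((ids.drop p).take k).length = k := by
      rw [List.length_take, List.length_drop, hlen]; omega
    rw [this]
    ring
  have hseg1 : pcode b (ids.take p).reverse - pcode b (ids.take (p - k)).reverse =
      pcode b ((ids.drop (p - k)).take k).reverse * b ^ (p - k) := by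
    have hsplit : ids.take p = ids.take (p - k) ++ (ids.drop (p - k)).take k := by
      conv_lhs => rw [show p = (p - k) + k from by omega, List.take_add]
    rw [hsplit, List.reverse_append, pcode_append]
    have : (ids.take (p - k)).reverse.length = p - k := by
      rw [List.length_reverse, List.length_take, hlen]; omega
    rw [this]
    ring
  -- the encoded comparison is segment-code equality
  have hpowpos : (0:Int) < b ^ (p - k) := by positivity
  have hiff1 :
      (pcode b (ids.take p).reverse - pcode b (ids.take (p - k)).reverse =
        (pcode b (ids.take (p + k)) - pcode b (ids.take p) * b ^ k) * b ^ (p - k)) ↔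
      pcode b ((ids.drop (p - k)).take k).reverse = pcode b ((ids.drop p).take k) := by
    rw [hseg2, hseg1]
    constructor
    · intro h
      exact mul_right_cancel₀ (ne_of_gt hpowpos) h
    · intro h
      rw [h]
  -- segment-code equality is segment equality (equal lengths, bounded digits)
  have hmem1 : ∀ d ∈ ((ids.drop (p - k)).take k).reverse, 0 ≤ d ∧ d < b := by
    intro d hd
    exact hdig d (List.mem_of_mem_drop (List.mem_of_mem_take (List.mem_reverse.mp hd)))
  have hmem2 : ∀ d ∈ (ids.drop p).take k, 0 ≤ d ∧ d < b := by
    intro d hd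
    exact hdig d (List.mem_of_mem_drop (List.mem_of_mem_take hd))
  have hlen12 : ((ids.drop (p - k)).take k).reverse.length = ((ids.drop p).take k).length := by
    rw [List.length_reverse, List.length_take, List.length_take, List.length_drop,
        List.length_drop, hlen]
    omega
  have hiff2 : pcode b ((ids.drop (p - k)).take k).reverse = pcode b ((ids.drop p).take k) ↔
      ((ids.drop (p - k)).take k).reverse = (ids.drop p).take k := by
    constructor
    · exact pcode_inj b hb1 _ _ hlen12 hmem1 hmem2
    · intro h; rw [h]
  -- transfer from ids back to the lines through the injective interning map
  have hinj : ∀ a ∈ L, ∀ c ∈ L, f a = f c → a = c := by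
    intro a ha c hc hfe
    obtain ⟨ja, hja, hjal, hga⟩ := hfin a ha
    obtain ⟨jc, hjc, hjcl, hgc⟩ := hfin c hc
    rw [hf] at hfe
    simp only [hja, hjc, Option.getD_some] at hfe
    have : ja = jc := by exact_mod_cast hfe
    rw [← hga, ← hgc, this]
  have hmap : ∀ (a m : Nat), (ids.drop a).take m = ((L.drop a).take m).map f := by
    intro a m
    rw [hids, ← List.map_drop, ← List.map_take]
  have hiff3 : ((ids.drop (p - k)).take k).reverse = (ids.drop p).take k ↔
      ((L.drop (p - k)).take k).reverse = (L.drop p).take k := by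
    rw [hmap, hmap, ← List.map_reverse]
    constructor
    · intro h
      exact map_inj_on f L hinj _ _
        (fun z hz => List.mem_of_mem_drop (List.mem_of_mem_take (List.mem_reverse.mp hz)))
        (fun z hz => List.mem_of_mem_drop (List.mem_of_mem_take hz)) h
    · intro h
      rw [h]
  exact if_congr (hiff1.trans (hiff2.trans hiff3)) rfl rfl

-- ===== VERDICT (by name: the statement is the Claim_ definition above) =====
theorem SolveGridReflections_spec : Claim_equal_SolveGridReflections := by
  intro GridRows _ hPre
  obtain ⟨hne, hlen⟩ := hPre
  unfold Spec_SolveGridReflections SolveGridReflections SolveGridReflections_alt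
  obtain ⟨s0, G, rfl⟩ : ∃ s0 G, GridRows = s0 :: G := by
    cases GridRows with
    | nil => exact absurd rfl hne
    | cons a l => exact ⟨a, l, rfl⟩
  simp only []
  rw [bAxisSum_eq, bAxisSum_eq]
  set rows := (s0 :: G).map String.toList with hrows
  have hheadD : rows.headD [] = s0.toList := rfl
  set W := (rows.headD []).length with hWdef
  have hW : ∀ r ∈ rows, r.length ≤ W := by
    intro r hr
    rw [hrows, List.mem_map] at hr
    obtain ⟨s, hs, rfl⟩ := hr
    simpa [hheadD] using hlen s hs
  rw [aStep_split]
  have hcols :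
      (List.range rows.length).foldl (fun cs y => aColUpd (rows.getD y []) cs)
        (List.replicate W []) =
      (List.range W).map (fun x => rows.filterMap (fun r => r[x]?)) := by
    rw [foldl_range_getD (fun cs row => aColUpd row cs) [] rows]
    have hrepl : (List.replicate W ([] : List Char)) =
        (List.range W).map (fun _ => ([] : List Char)) := by
      rw [List.map_const', List.length_range]
    rw [hrepl, cols_eq W rows (fun _ => []) hW]
    simp
  rw [hcols]
  rw [pass_eq rows 100 0]
  have hone : (fun (t : Int) (x : Nat) =>
      if 0 < x ∧ ((List.range W).map (fun x => rows.filterMap (fun r => r[x]?))).getD x []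
            = ((List.range W).map (fun x => rows.filterMap (fun r => r[x]?))).getD (x - 1) []
          ∧ aCheck ((List.range W).map (fun x => rows.filterMap (fun r => r[x]?))) x = true
      then t + (x : Int) else t) =
      (fun (t : Int) (x : Nat) =>
      if 0 < x ∧ ((List.range W).map (fun x => rows.filterMap (fun r => r[x]?))).getD x []
            = ((List.range W).map (fun x => rows.filterMap (fun r => r[x]?))).getD (x - 1) []
          ∧ aCheck ((List.range W).map (fun x => rows.filterMap (fun r => r[x]?))) x = true
      then t + 1 * (x : Int) else t) := by
    funext t x
    split_ifs <;> ring
  rw [hone, pass_eq _ 1 _]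
  simp only []
  ring
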